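-- pv_equiv track=rewrite | github.com/president-xd/Writeups | BlackHatMEA_2025/Crypto/Hatagawa_I/solution.py | recover_stepn_A_candidates
-- ===== SOURCE A (Python) =====
-- from typing import List, Set
--
-- MASK64 = (1 << 64) - 1
--
-- def tz(x: int) -> int:
--     if x == 0:
--         return 64
--     return (x & -x).bit_length() - 1
--
-- def inv_odd_mod_2k(a: int, k: int) -> int:
--     assert a & 1
--     x = 1
--     for i in range(1, k):
--         mod = 1 << (i + 1)
--         x = (x * (2 - (a * x) % mod)) % mod
--     return x % (1 << k)
--
-- def recover_stepn_A_candidates(z0: int, z1: int, z2: int) -> Set[int]: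
--     """Return all 64-bit A candidates from z0->z1->z2 under modulus 2^64."""
--     d1 = (z1 - z0) & MASK64
--     d2 = (z2 - z1) & MASK64
--     if d1 == 0 or d2 == 0:
--         return set()
--     v = min(tz(d1), tz(d2))
--     k = 64 - v
--     d1p = d1 >> v
--     d2p = d2 >> v
--     inv = inv_odd_mod_2k(d1p, k)
--     A_mod = (d2p * inv) % (1 << k)
--     return { (A_mod + (t << k)) & MASK64 for t in range(1 << v) }
-- ===== SOURCE B (Python) =====
-- MASK64 = (1 << 64) - 1
--
--
-- def recover_stepn_A_candidates(z0: int, z1: int, z2: int):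
--     """Return all 64-bit A candidates from z0->z1->z2 under modulus 2^64."""
--     d1 = (z1 - z0) & MASK64
--     d2 = (z2 - z1) & MASK64
--     if d1 == 0 or d2 == 0:
--         return set()
--     # halve both differences until the first is odd; k tracks the reduced width
--     k = 64
--     while d1 & 1 == 0:
--         d1 >>= 1
--         d2 >>= 1
--         k -= 1
--     # 2-adic long division: build A bit by bit so that A*d1 == d2 (mod 2^k).
--     # No modular inverse is computed: d1 is odd, so a set bit i of the
--     # remainder is cleared by subtracting d1 << i.
--     mask = (1 << k) - 1
--     A = 0
--     r = d2
--     for i in range(k):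
--         if (r >> i) & 1:
--             A += 1 << i
--             r = (r - (d1 << i)) & mask
--     return {A + (t << k) for t in range(1 << (64 - k))}
-- ===== Notes on version B (the rewrite author's own statement) =====
-- stated objective: alternative
-- what changed: B computes no modular inverse at all: instead of A's tz/bit_length trailing-zero arithmetic, Hensel-lifting inverse loop and multiply-mod, B strips the common power of two with a joint halving while-loop and then recovers the multiplier directly by bitwise 2-adic long division, clearing one remainder bit per iteration (the i-th set bit of r is cleared by subtracting d1<<i, which fixes bit i of A).
import Mathlib
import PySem

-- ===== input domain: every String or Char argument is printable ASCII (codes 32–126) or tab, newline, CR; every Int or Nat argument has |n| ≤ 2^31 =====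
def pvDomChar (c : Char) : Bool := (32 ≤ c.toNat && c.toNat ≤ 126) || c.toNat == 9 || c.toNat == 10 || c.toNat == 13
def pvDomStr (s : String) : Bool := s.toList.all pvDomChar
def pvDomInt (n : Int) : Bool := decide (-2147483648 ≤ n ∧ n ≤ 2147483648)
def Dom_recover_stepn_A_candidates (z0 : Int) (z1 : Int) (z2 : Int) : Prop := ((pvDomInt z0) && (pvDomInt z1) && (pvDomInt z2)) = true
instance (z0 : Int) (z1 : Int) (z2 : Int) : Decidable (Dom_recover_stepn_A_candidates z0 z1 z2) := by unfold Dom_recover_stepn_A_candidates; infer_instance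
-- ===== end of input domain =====

-- B replaces A's trailing-zero arithmetic and its Newton–Hensel modular-inverse computation by a
-- joint halving loop plus a bitwise 2-adic long division that builds the multiplier bit by bit,
-- never computing an inverse at all (alternative decomposition, similar cost).

-- ===== PORT A =====
def pvMASK64 : Int := (1 <<< 64) - 1

def pvTz (x : Int) : Int :=
  if x = 0 then 64
  else (PySem.Int.bitLength (PySem.Int.band x (-x)) : Int) - 1
  -- (x & -x).bit_length() - 1

-- the body of inv_odd_mod_2k's `for i in range(1, k)` loop (x is the accumulator)
def pvHfold (a : Int) (k : Int) : Int :=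
  (PySem.List.pyRange 1 k).foldl
    (fun x i =>
      let md := (1 : Int) <<< (i + 1).toNat  -- i ≥ 1 here, so .toNat is exact
      PySem.Int.mod (x * (2 - PySem.Int.mod (a * x) md)) md) 1

-- inv_odd_mod_2k; its `assert a & 1` is Pre_'s to exclude (it fails exactly when a is even)
def pvInvOddMod2k (a : Int) (k : Int) : Int :=
  PySem.Int.mod (pvHfold a k) ((1 : Int) <<< k.toNat)  -- k = 64 - v ≥ 0, so .toNat is exact

def recover_stepn_A_candidates (z0 : Int) (z1 : Int) (z2 : Int) : List Int :=
  let d1 := PySem.Int.band (z1 - z0) pvMASK64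
  let d2 := PySem.Int.band (z2 - z1) pvMASK64
  if d1 = 0 ∨ d2 = 0 then []
  else
    let v := min (pvTz d1) (pvTz d2)
    let k := 64 - v
    let d1p := d1 >>> v.toNat        -- 0 ≤ v ≤ 64, so .toNat is exact
    let d2p := d2 >>> v.toNat
    let inv := pvInvOddMod2k d1p k
    let A_mod := PySem.Int.mod (d2p * inv) ((1 : Int) <<< k.toNat)
    PySem.Set.ofList ((PySem.List.pyRange 0 ((1 : Int) <<< v.toNat)).map
      (fun (t : Int) => PySem.Int.band (A_mod + (t <<< k.toNat)) pvMASK64))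

-- ===== PORT B =====
-- the `while d1 & 1 == 0:` halving loop; the `0 < d1` guard only makes the recursion total
-- (at the call site d1 is a nonzero masked value, so it is exactly Python's loop)
def pvHalve (d1 : Int) (d2 : Int) (k : Int) : Int × Int × Int :=
  if h : 0 < d1 ∧ PySem.Int.band d1 1 = 0 then
    pvHalve (d1 >>> (1 : Nat)) (d2 >>> (1 : Nat)) (k - 1)
  else (d1, d2, k)
termination_by d1.toNat
decreasing_by
  have h2 : d1 >>> (1 : Nat) = d1 / 2 := by
    rw [Int.shiftRight_eq_div_pow]; norm_num
  simp only [h2]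
  omega

-- the body of the `for i in range(k)` division loop; state = (A, r)
def pvDivStep (d1 : Int) (mask : Int) (st : Int × Int) (i : Int) : Int × Int :=
  if PySem.Int.band (st.2 >>> i.toNat) 1 ≠ 0 then
    (st.1 + ((1 : Int) <<< i.toNat), PySem.Int.band (st.2 - (d1 <<< i.toNat)) mask)
  else st

def recover_stepn_A_candidates_alt (z0 : Int) (z1 : Int) (z2 : Int) : List Int :=
  let d1 := PySem.Int.band (z1 - z0) pvMASK64
  let d2 := PySem.Int.band (z2 - z1) pvMASK64
  if d1 = 0 ∨ d2 = 0 then []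
  else
    let h := pvHalve d1 d2 64
    let d1' := h.1
    let d2' := h.2.1
    let k := h.2.2
    let mask := ((1 : Int) <<< k.toNat) - 1      -- k = 64 - v ≥ 0, so .toNat is exact
    let st := (PySem.List.pyRange 0 k).foldl (pvDivStep d1' mask) (0, d2')
    PySem.Set.ofList ((PySem.List.pyRange 0 ((1 : Int) <<< (64 - k).toNat)).map
      (fun (t : Int) => st.1 + (t <<< k.toNat)))

-- ===== PRECONDITION & SPEC =====
-- Pre_ excludes exactly the inputs on which A RAISES (AssertionError in inv_odd_mod_2k):
-- both masked differences d1, d2 nonzero but the lowest set bit of d1 (= d1 & -d1) does not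
-- divide d2, so d1 >> v is even.
def Pre_recover_stepn_A_candidates (z0 : Int) (z1 : Int) (z2 : Int) : Prop :=
  let d1 := PySem.Int.band (z1 - z0) pvMASK64
  let d2 := PySem.Int.band (z2 - z1) pvMASK64
  d1 = 0 ∨ d2 = 0 ∨ PySem.Int.band d1 (-d1) ∣ d2
instance (z0 : Int) (z1 : Int) (z2 : Int) : Decidable (Pre_recover_stepn_A_candidates z0 z1 z2) := by unfold Pre_recover_stepn_A_candidates; infer_instance

def pvWitness_recover_stepn_A_candidates : Int × Int × Int := (0, 1, 3)

def Spec_recover_stepn_A_candidates (z0 : Int) (z1 : Int) (z2 : Int) (out : List Int) : Prop := out = recover_stepn_A_candidates_alt z0 z1 z2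
instance (z0 : Int) (z1 : Int) (z2 : Int) (out : List Int) : Decidable (Spec_recover_stepn_A_candidates z0 z1 z2 out) := by unfold Spec_recover_stepn_A_candidates; infer_instance

-- ===== CLAIM (what is proved, stated in full; the proofs are below) =====
def Claim_equal_recover_stepn_A_candidates : Prop := ∀ (z0 : Int) (z1 : Int) (z2 : Int), Dom_recover_stepn_A_candidates z0 z1 z2 → Pre_recover_stepn_A_candidates z0 z1 z2 → Spec_recover_stepn_A_candidates z0 z1 z2 (recover_stepn_A_candidates z0 z1 z2)

-- ===== LEMMAS AND PROOFS =====

-- Nat bit-twiddling: merging/splitting the lowest bit of an AND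
theorem pv_and_even_odd (a b : Nat) : (2*a) &&& (2*b+1) = 2*(a &&& b) := by
  apply Nat.eq_of_testBit_eq
  intro i
  cases i with
  | zero =>
      simp only [Nat.testBit_zero]
      have h1 : 2*a % 2 = 0 := by omega
      have h2 : 2*(a &&& b) % 2 = 0 := by omega
      simp [h1, h2]
  | succ i =>
      rw [Nat.testBit_and]
      simp only [Nat.testBit_succ]
      have h1 : 2*a/2 = a := by omega
      have h2 : (2*b+1)/2 = b := by omega
      have h3 : 2*(a &&& b)/2 = a &&& b := by omega
      rw [h1, h2, h3, ← Nat.testBit_and]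

theorem pv_and_odd_even (a b : Nat) : (2*a+1) &&& (2*b) = 2*(a &&& b) := by
  apply Nat.eq_of_testBit_eq
  intro i
  cases i with
  | zero =>
      simp only [Nat.testBit_zero]
      have h1 : 2*b % 2 = 0 := by omega
      have h2 : 2*(a &&& b) % 2 = 0 := by omega
      simp [h1, h2]
  | succ i =>
      rw [Nat.testBit_and]
      simp only [Nat.testBit_succ]
      have h1 : (2*a+1)/2 = a := by omega
      have h2 : 2*b/2 = b := by omega
      have h3 : 2*(a &&& b)/2 = a &&& b := by omega
      rw [h1, h2, h3, ← Nat.testBit_and]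

-- n &&& (n - 1) clears the lowest set bit
theorem pv_and_pred (t m : Nat) (hm : Odd m) :
    (2^t * m) &&& (2^t * m - 1) = 2^t * m - 2^t := by
  induction t with
  | zero =>
      obtain ⟨j, rfl⟩ := hm
      simpa [Nat.mul_comm] using pv_and_odd_even j j
  | succ t ih =>
      have hm1 : 1 ≤ m := hm.pos
      have hpos : 1 ≤ 2^t * m := Nat.one_le_iff_ne_zero.mpr (by positivity)
      have e1 : 2^(t+1) * m = 2 * (2^t * m) := by ring
      have e2 : 2 * (2^t * m) - 1 = 2 * (2^t * m - 1) + 1 := by omega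
      rw [e1, e2, pv_and_even_odd, ih]
      have h2t : 2^t ≤ 2^t * m := Nat.le_mul_of_pos_right _ hm1
      have e3 : 2^(t+1) = 2 * 2^t := by ring
      omega

-- the value of Python's x & -x for a positive x
theorem pv_band_neg_self (t m : Nat) (hm : Odd m) :
    PySem.Int.band ((2^t * m : Nat) : Int) (-((2^t * m : Nat) : Int)) = ((2^t : Nat) : Int) := by
  have hm1 : 1 ≤ m := hm.pos
  have hpos : 1 ≤ 2^t * m := Nat.one_le_iff_ne_zero.mpr (Nat.mul_ne_zero (by positivity) (by omega))
  have h2t : 2^t ≤ 2^t * m := Nat.le_mul_of_pos_right _ hm1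
  unfold PySem.Int.band
  have hnn : (0 : Int) ≤ ((2^t * m : Nat) : Int) := by positivity
  have hneg : ¬ (0 : Int) ≤ -((2^t * m : Nat) : Int) := by
    simp only [not_le]
    have : (0 : Int) < ((2^t * m : Nat) : Int) := by exact_mod_cast hpos
    omega
  rw [if_pos hnn, if_neg hneg]
  have e1 : (((2^t * m : Nat) : Int)).toNat = 2^t * m := by omega
  have e2 : (-(-((2^t * m : Nat) : Int)) - 1).toNat = 2^t * m - 1 := by omega
  rw [e1, e2, pv_and_pred t m hm]
  exact_mod_cast congrArg (Nat.cast : Nat → Int) (Nat.sub_sub_self h2t)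

-- Python's  y & (2^k - 1)  is  y mod 2^k  (also for negative y)
theorem pv_band_mask_pow (y : Int) (k : Nat) :
    PySem.Int.band y ((2:Int)^k - 1) = y % 2^k := by
  have hNc : ((2^k : Nat) : Int) = (2:Int)^k := by push_cast; ring
  have hN : 0 < 2^k := Nat.two_pow_pos k
  have hmnn : (0 : Int) ≤ (2:Int)^k - 1 := by
    have : (0:Int) < 2^k := by positivity
    omega
  have e1 : ((2:Int)^k - 1).toNat = 2^k - 1 := by omega
  unfold PySem.Int.band
  by_cases hy : (0 : Int) ≤ y
  · rw [if_pos hy, if_pos hmnn, e1, Nat.and_two_pow_sub_one_eq_mod]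
    push_cast
    rw [Int.toNat_of_nonneg hy]
  · rw [if_neg hy, if_pos hmnn, e1, Nat.land_comm, Nat.and_two_pow_sub_one_eq_mod]
    set n := (-y - 1).toNat with hn
    have hyn : y = -(n : Int) - 1 := by omega
    have hm : n % 2^k < 2^k := Nat.mod_lt n hN
    have hmc : ((n % 2^k : Nat) : Int) < (2:Int)^k := by
      rw [← hNc]; exact_mod_cast hm
    have hmc0 : (0 : Int) ≤ ((n % 2^k : Nat) : Int) := by positivity
    have hdvd : (2:Int)^k ∣ ((n : Int) - ((n % 2^k : Nat) : Int)) := by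
      refine ⟨((n / 2^k : Nat) : Int), ?_⟩
      have h := Nat.div_add_mod n (2^k)
      have h' : ((2^k : Nat) : Int) * ((n / 2^k : Nat) : Int) + ((n % 2^k : Nat) : Int) = (n : Int) := by
        exact_mod_cast congrArg (Nat.cast : Nat → Int) h
      rw [hNc] at h'
      linarith
    have hcong : y % (2:Int)^k = (2:Int)^k - 1 - ((n % 2^k : Nat) : Int) := by
      have hmod : y ≡ (2:Int)^k - 1 - ((n % 2^k : Nat) : Int) [ZMOD (2:Int)^k] := by
        rw [Int.modEq_iff_dvd]
        obtain ⟨c, hc⟩ := hdvd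
        exact ⟨1 + c, by rw [hyn]; linarith [hc]⟩
      have := hmod
      unfold Int.ModEq at this
      rw [this, Int.emod_eq_of_lt (by omega) (by omega)]
    rw [hcong]
    omega

-- Python's  y & MASK64  is  y mod 2^64
theorem pv_band_mask (y : Int) : PySem.Int.band y pvMASK64 = y % 2^64 := by
  have hM : pvMASK64 = (2:Int)^64 - 1 := by decide
  rw [hM, pv_band_mask_pow]

theorem pv_mask_nonneg (y : Int) : 0 ≤ PySem.Int.band y pvMASK64 := by
  rw [pv_band_mask]; exact Int.emod_nonneg y (by norm_num)

theorem pv_mask_lt (y : Int) : PySem.Int.band y pvMASK64 < 2^64 := by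
  rw [pv_band_mask]; exact Int.emod_lt_of_pos y (by norm_num)

-- pvTz computes the 2-adic valuation
theorem pv_tz_eq (t m : Nat) (hm : Odd m) : pvTz ((2^t * m : Nat) : Int) = (t : Int) := by
  have hm1 : 1 ≤ m := hm.pos
  have hpos : 1 ≤ 2^t * m := Nat.one_le_iff_ne_zero.mpr (Nat.mul_ne_zero (by positivity) (by omega))
  have hne : ((2^t * m : Nat) : Int) ≠ 0 := by
    simpa using Nat.one_le_iff_ne_zero.mp hpos
  unfold pvTz
  rw [if_neg hne, pv_band_neg_self t m hm]
  have hbl : PySem.Int.bitLength (((2^t : Nat) : Int)) = t + 1 := by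
    have h1 : (((2^t : Nat) : Int)).natAbs < 2 ^ PySem.Int.bitLength (((2^t : Nat) : Int)) :=
      PySem.Int.lt_two_pow_bitLength _
    have h2 : 2 ^ (PySem.Int.bitLength (((2^t : Nat) : Int)) - 1) ≤ (((2^t : Nat) : Int)).natAbs :=
      PySem.Int.two_pow_bitLength_le _ (by positivity)
    have ha : (((2^t : Nat) : Int)).natAbs = 2^t := by simp
    rw [ha] at h1 h2
    have l1 : t < PySem.Int.bitLength (((2^t : Nat) : Int)) :=
      (Nat.pow_lt_pow_iff_right (by norm_num)).mp h1
    have l2 : PySem.Int.bitLength (((2^t : Nat) : Int)) - 1 ≤ t :=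
      (Nat.pow_le_pow_iff_right (by norm_num)).mp h2
    omega
  rw [hbl]
  push_cast
  ring

-- shift bridges (Python << and >> on nonnegative counts)
theorem pv_shl_one (n : Nat) : (1 : Int) <<< n = 2^n := by
  rw [Int.shiftLeft_eq]; ring

-- same, for Lean's homogeneous Int shift (a Nat count cast to Int)
theorem pv_shl_one' (n : Nat) : (1 : Int) <<< ((n : Nat) : Int) = 2^n := by
  rw [Int.shiftLeft_eq_mul_pow]; push_cast; ring

theorem pv_shl (x : Int) (n : Nat) : x <<< n = x * 2^n := by
  rw [Int.shiftLeft_eq]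

theorem pv_shr (x : Int) (n : Nat) : x >>> n = x / 2^n := by
  rw [Int.shiftRight_eq_div_pow]; norm_num

-- one Newton/Hensel step: the congruence is lifted one power of two
theorem pv_hensel_step (a x : Int) (j : Nat) (hj : 1 ≤ j)
    (hx : (2^j : Int) ∣ a * x - 1) :
    0 ≤ PySem.Int.mod (x * (2 - PySem.Int.mod (a * x) (2^(j+1)))) (2^(j+1)) ∧
    PySem.Int.mod (x * (2 - PySem.Int.mod (a * x) (2^(j+1)))) (2^(j+1)) < 2^(j+1) ∧
    (2^(j+1) : Int) ∣ a * PySem.Int.mod (x * (2 - PySem.Int.mod (a * x) (2^(j+1)))) (2^(j+1)) - 1 := by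
  set md := (2 : Int)^(j+1) with hmddef
  have hmd : (0 : Int) < md := by positivity
  set x' := PySem.Int.mod (x * (2 - PySem.Int.mod (a * x) md)) md with hx'def
  refine ⟨PySem.Int.mod_nonneg _ hmd, PySem.Int.mod_lt _ hmd, ?_⟩
  have hx' : x' = (x * (2 - (a * x) % md)) % md := by
    rw [hx'def, PySem.Int.mod_eq_emod_of_pos hmd, PySem.Int.mod_eq_emod_of_pos hmd]
  have hmem : ∀ y : Int, (y % md) ≡ y [ZMOD md] := fun y => Int.emod_emod_of_dvd y dvd_rfl
  have c1 : x' ≡ x * (2 - a * x) [ZMOD md] := by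
    rw [hx']
    calc (x * (2 - (a * x) % md)) % md
        ≡ x * (2 - (a * x) % md) [ZMOD md] := hmem _
      _ ≡ x * (2 - a * x) [ZMOD md] :=
          Int.ModEq.mul_left x (Int.ModEq.sub (Int.ModEq.refl 2) (hmem (a * x)))
  have c2 : a * x' ≡ a * (x * (2 - a * x)) [ZMOD md] := Int.ModEq.mul_left a c1
  have c3 : a * (x * (2 - a * x)) ≡ 1 [ZMOD md] := by
    rw [Int.modEq_iff_dvd]
    have he : 1 - a * (x * (2 - a * x)) = (a * x - 1)^2 := by ring
    rw [he]
    obtain ⟨c, hc⟩ := hx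
    have he2 : (a * x - 1)^2 = 2^(2*j) * c^2 := by rw [hc]; ring
    rw [he2]
    exact Dvd.dvd.mul_right (pow_dvd_pow 2 (by omega)) _
  have hfin := c2.trans c3
  rw [Int.modEq_iff_dvd] at hfin
  obtain ⟨c, hc⟩ := hfin
  exact ⟨-c, by rw [mul_neg]; omega⟩

-- the loop of inv_odd_mod_2k computes the inverse modulo 2^k
theorem pv_hensel (a : Int) (ha : a % 2 = 1) (k : Nat) (hk : 1 ≤ k) :
    0 ≤ pvHfold a (k : Int) ∧ pvHfold a (k : Int) < 2^k ∧ (2^k : Int) ∣ a * pvHfold a (k : Int) - 1 := by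
  induction k with
  | zero => omega
  | succ k ih =>
      by_cases hk1 : 1 ≤ k
      · obtain ⟨h0, h1, h2⟩ := ih hk1
        have hsplit : pvHfold a ((k + 1 : Nat) : Int) =
            PySem.Int.mod (pvHfold a (k : Int) * (2 - PySem.Int.mod (a * pvHfold a (k : Int)) (2^(k+1)))) (2^(k+1)) := by
          unfold pvHfold
          have hcast : ((k + 1 : Nat) : Int) = (k : Int) + 1 := by push_cast; ring
          rw [hcast, PySem.List.pyRange_one_succ_right (by exact_mod_cast hk1), List.foldl_append]
          have ht : ((k : Int) + 1).toNat = k + 1 := by omega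
          simp only [List.foldl, ht, pv_shl_one']
        rw [hsplit]
        exact pv_hensel_step a (pvHfold a (k : Int)) k hk1 h2
      · have hk0 : k = 0 := by omega
        subst hk0
        have h1 : pvHfold a ((1 : Nat) : Int) = 1 := by
          unfold pvHfold
          rw [PySem.List.pyRange_one_eq_nil (by norm_num)]
          rfl
        rw [h1]
        refine ⟨by norm_num, by norm_num, ⟨(a-1)/2, by omega⟩⟩

-- cancellation modulo 2^k against an element with a known inverse
theorem pv_cancel (c u m x y : Int) (hinv : m ∣ c * u - 1) (h : m ∣ c * x - c * y) :
    m ∣ x - y := by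
  have he : x - y = u * (c * x - c * y) - (c * u - 1) * (x - y) := by ring
  rw [he]
  exact dvd_sub (Dvd.dvd.mul_left h u) (Dvd.dvd.mul_right hinv (x - y))

-- the halving loop strips the power of two off d1 and halves d2 and k alongside
theorem pv_halve_eq (a : Nat) (m1 : Nat) (hm : Odd m1) :
    ∀ (d2 k : Int), 0 ≤ d2 →
    pvHalve ((2^a * m1 : Nat) : Int) d2 k = (((m1 : Nat) : Int), d2 / 2^a, k - a) := by
  induction a with
  | zero =>
      intro d2 k _
      rw [pvHalve]
      have hodd : PySem.Int.band ((2^0 * m1 : Nat) : Int) 1 ≠ 0 := by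
        rw [PySem.Int.band_one, PySem.Int.mod_eq_emod_of_pos (by norm_num)]
        have : ((2^0 * m1 : Nat) : Int) % 2 = 1 := by
          have := Nat.odd_iff.mp hm
          omega
        omega
      rw [dif_neg (by tauto)]
      simp
  | succ a ih =>
      intro d2 k hd2
      have hm1 : 1 ≤ m1 := hm.pos
      rw [pvHalve]
      have hpos : (0 : Int) < ((2^(a+1) * m1 : Nat) : Int) := by
        have : 1 ≤ 2^(a+1) * m1 := Nat.one_le_iff_ne_zero.mpr (by positivity)
        exact_mod_cast this
      have heven : PySem.Int.band ((2^(a+1) * m1 : Nat) : Int) 1 = 0 := by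
        rw [PySem.Int.band_one, PySem.Int.mod_eq_emod_of_pos (by norm_num)]
        have : ((2^(a+1) * m1 : Nat) : Int) % 2 = 0 := by
          have : 2 ∣ 2^(a+1) * m1 := Dvd.dvd.mul_right (dvd_pow_self 2 (by omega)) m1
          omega
        omega
      rw [dif_pos ⟨hpos, heven⟩]
      have e1 : ((2^(a+1) * m1 : Nat) : Int) >>> (1 : Nat) = ((2^a * m1 : Nat) : Int) := by
        rw [pv_shr]
        have : ((2^(a+1) * m1 : Nat) : Int) = 2 * ((2^a * m1 : Nat) : Int) := by push_cast; ring
        rw [this]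
        norm_num [Int.mul_ediv_cancel_left]
      have e2 : d2 >>> (1 : Nat) = d2 / 2 := by rw [pv_shr]; norm_num
      rw [e1, e2, ih (d2 / 2) (k - 1) (Int.ediv_nonneg hd2 (by norm_num))]
      have e3 : d2 / 2 / 2^a = d2 / 2^(a+1) := by
        rw [Int.ediv_ediv_of_nonneg (by norm_num : (0:Int) ≤ 2)]
        rw [show (2:Int) * 2^a = 2^(a+1) from by ring]
      have e4 : k - 1 - (a : Int) = k - ((a : Nat) + 1 : Nat) := by push_cast; ring
      rw [e3, e4]

-- invariant of the bitwise 2-adic division loop after the first i iterations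
theorem pv_div_inv (d1p d2p : Int) (k : Nat) (hd1 : d1p % 2 = 1)
    (hr0 : 0 ≤ d2p) (hr1 : d2p < 2^k) (i : Nat) (hik : i ≤ k) :
    0 ≤ ((PySem.List.pyRange 0 (i : Int)).foldl (pvDivStep d1p ((2:Int)^k - 1)) (0, d2p)).1 ∧
    ((PySem.List.pyRange 0 (i : Int)).foldl (pvDivStep d1p ((2:Int)^k - 1)) (0, d2p)).1 < 2^i ∧
    0 ≤ ((PySem.List.pyRange 0 (i : Int)).foldl (pvDivStep d1p ((2:Int)^k - 1)) (0, d2p)).2 ∧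
    ((PySem.List.pyRange 0 (i : Int)).foldl (pvDivStep d1p ((2:Int)^k - 1)) (0, d2p)).2 < 2^k ∧
    ((2:Int)^i ∣ ((PySem.List.pyRange 0 (i : Int)).foldl (pvDivStep d1p ((2:Int)^k - 1)) (0, d2p)).2) ∧
    ((2:Int)^k ∣ d2p - d1p * ((PySem.List.pyRange 0 (i : Int)).foldl (pvDivStep d1p ((2:Int)^k - 1)) (0, d2p)).1
      - ((PySem.List.pyRange 0 (i : Int)).foldl (pvDivStep d1p ((2:Int)^k - 1)) (0, d2p)).2) := by
  induction i with
  | zero =>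
      rw [show ((0 : Nat) : Int) = 0 from rfl, PySem.List.pyRange_one_eq_nil (by norm_num)]
      simp only [List.foldl]
      refine ⟨le_refl 0, by norm_num, hr0, hr1, ⟨d2p, by ring⟩, ⟨0, by ring⟩⟩
  | succ i ih =>
      have hik' : i ≤ k := by omega
      obtain ⟨hA0, hA1, hr0', hr1', ⟨q, hq⟩, hc⟩ := ih hik'
      set st := (PySem.List.pyRange 0 (i : Int)).foldl (pvDivStep d1p ((2:Int)^k - 1)) (0, d2p) with hst
      have hsplit : (PySem.List.pyRange 0 ((i + 1 : Nat) : Int)).foldl (pvDivStep d1p ((2:Int)^k - 1)) (0, d2p)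
          = pvDivStep d1p ((2:Int)^k - 1) st (i : Int) := by
        have hcast : ((i + 1 : Nat) : Int) = (i : Int) + 1 := by push_cast; ring
        rw [hcast, PySem.List.pyRange_one_succ_right (by positivity), List.foldl_append]
        simp only [List.foldl, hst]
      rw [hsplit]
      have hq0 : 0 ≤ q := by
        by_contra hneg
        rw [not_le] at hneg
        have : (2:Int)^i * q < 0 := mul_neg_of_pos_of_neg (by positivity) hneg
        omega
      -- the bit test reads bit i of the remainder, i.e. the parity of q
      have hbit : PySem.Int.band (st.2 >>> ((i : Int)).toNat) 1 = q % 2 := by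
        rw [Int.toNat_natCast, PySem.Int.band_one, PySem.Int.mod_eq_emod_of_pos (by norm_num),
            pv_shr, hq, Int.mul_ediv_cancel_left _ (by positivity)]
      unfold pvDivStep
      by_cases hpar : q % 2 = 1
      · rw [if_pos (by rw [hbit, hpar]; norm_num)]
        have hik1 : i + 1 ≤ k := by omega
        set x := st.2 - d1p <<< ((i : Int)).toNat with hxdef
        have hx : x = st.2 - d1p * 2^i := by
          rw [hxdef, Int.toNat_natCast, pv_shl]
        have hr'mod : PySem.Int.band x ((2:Int)^k - 1) = x % 2^k := pv_band_mask_pow x k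
        have hdvdx : (2:Int)^(i+1) ∣ x := by
          rw [hx, hq]
          have : (2:Int)^i * q - d1p * 2^i = 2^i * (q - d1p) := by ring
          rw [this]
          have h2 : (2:Int) ∣ q - d1p := by omega
          obtain ⟨w, hw⟩ := h2
          exact ⟨w, by rw [hw]; ring⟩
        have hkpos : (0:Int) < 2^k := by positivity
        refine ⟨?_, ?_, ?_, ?_, ?_, ?_⟩
        · simp only []
          rw [Int.toNat_natCast, pv_shl_one]
          positivity
        · simp only []
          rw [Int.toNat_natCast, pv_shl_one]
          have : (2:Int)^(i+1) = 2^i + 2^i := by ring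
          omega
        · simp only []
          rw [hr'mod]
          exact Int.emod_nonneg x (by positivity)
        · simp only []
          rw [hr'mod]
          exact Int.emod_lt_of_pos x hkpos
        · simp only []
          rw [hr'mod, Int.emod_def]
          exact dvd_sub hdvdx (Dvd.dvd.mul_right (pow_dvd_pow 2 hik1) _)
        · simp only []
          rw [hr'mod, Int.emod_def, Int.toNat_natCast, pv_shl_one]
          have he : d2p - d1p * (st.1 + 2^i) - (x - 2^k * (x / 2^k))
              = (d2p - d1p * st.1 - st.2) + (st.2 - d1p * 2^i - x) + 2^k * (x / 2^k) := by ring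
          rw [he, hx]
          refine dvd_add (dvd_add hc ?_) (dvd_mul_right _ _)
          exact ⟨0, by ring⟩
      · rw [if_neg (by rw [hbit]; omega)]
        refine ⟨hA0, ?_, hr0', hr1', ?_, hc⟩
        · have hp : (0:Int) < 2^i := by positivity
          have h2e : (2:Int)^(i+1) = 2^i + 2^i := by ring
          omega
        have h2 : (2:Int) ∣ q := by omega
        obtain ⟨w, hw⟩ := h2
        exact ⟨w, by rw [hq, hw]; ring⟩

-- after all k iterations the remainder is 0, so st.1 solves d1p * x ≡ d2p (mod 2^k)
theorem pv_div_sol (d1p d2p : Int) (k : Nat) (hd1 : d1p % 2 = 1)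
    (hr0 : 0 ≤ d2p) (hr1 : d2p < 2^k) :
    0 ≤ ((PySem.List.pyRange 0 (k : Int)).foldl (pvDivStep d1p ((2:Int)^k - 1)) (0, d2p)).1 ∧
    ((PySem.List.pyRange 0 (k : Int)).foldl (pvDivStep d1p ((2:Int)^k - 1)) (0, d2p)).1 < 2^k ∧
    ((2:Int)^k ∣ d2p - d1p * ((PySem.List.pyRange 0 (k : Int)).foldl (pvDivStep d1p ((2:Int)^k - 1)) (0, d2p)).1) := by
  obtain ⟨hA0, hA1, hr0', hr1', ⟨c, hc⟩, hcong⟩ := pv_div_inv d1p d2p k hd1 hr0 hr1 k (le_refl k)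
  set st := (PySem.List.pyRange 0 (k : Int)).foldl (pvDivStep d1p ((2:Int)^k - 1)) (0, d2p) with hst
  have hkpos : (0:Int) < 2^k := by positivity
  have hc0 : 0 ≤ c := by nlinarith
  have hc1 : c < 1 := by nlinarith
  have hr_zero : st.2 = 0 := by
    have : c = 0 := by omega
    rw [hc, this, mul_zero]
  refine ⟨hA0, hA1, ?_⟩
  have := hcong
  rw [hr_zero] at this
  simpa using this

-- masking with MASK64 is the identity on the emitted candidates
theorem pv_last (A0 t : Int) (a : Nat) (ha : a ≤ 64)
    (hA0 : 0 ≤ A0) (hA1 : A0 < 2^(64-a))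
    (ht0 : 0 ≤ t) (ht1 : t < ((2^a : Nat) : Int)) :
    PySem.Int.band (A0 + t * 2^(64-a)) pvMASK64 = A0 + t * 2^(64-a) := by
  rw [pv_band_mask]
  have h2p : (0 : Int) < 2^(64-a) := by positivity
  have hs : ((2 : Int)^(64-a)) * (((2^a : Nat) : Int)) = 2^64 := by
    push_cast
    rw [← pow_add, show 64 - a + a = 64 from by omega]
    norm_num
  apply Int.emod_eq_of_lt
  · nlinarith
  · have hle : t * 2^(64-a) ≤ ((((2^a : Nat) : Int)) - 1) * 2^(64-a) :=
      mul_le_mul_of_nonneg_right (by omega) h2p.le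
    nlinarith

-- the assembled equivalence on the non-trivial branch
theorem pv_main (z0 z1 z2 : Int) (hpre : Pre_recover_stepn_A_candidates z0 z1 z2) :
    recover_stepn_A_candidates z0 z1 z2 = recover_stepn_A_candidates_alt z0 z1 z2 := by
  unfold Pre_recover_stepn_A_candidates at hpre
  simp only [recover_stepn_A_candidates, recover_stepn_A_candidates_alt]
  by_cases hz : PySem.Int.band (z1 - z0) pvMASK64 = 0 ∨ PySem.Int.band (z2 - z1) pvMASK64 = 0
  · simp only [if_pos hz]
  · simp only [if_neg hz]
    rw [not_or] at hz
    obtain ⟨h1ne, h2ne⟩ := hz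
    have h1nn := pv_mask_nonneg (z1 - z0)
    have h1lt := pv_mask_lt (z1 - z0)
    have h2nn := pv_mask_nonneg (z2 - z1)
    have h2lt := pv_mask_lt (z2 - z1)
    obtain ⟨a, m1, hm1odd, hn1⟩ :=
      Nat.exists_eq_two_pow_mul_odd (n := (PySem.Int.band (z1 - z0) pvMASK64).toNat) (by omega)
    obtain ⟨b, m2, hm2odd, hn2⟩ :=
      Nat.exists_eq_two_pow_mul_odd (n := (PySem.Int.band (z2 - z1) pvMASK64).toNat) (by omega)
    have e1 : PySem.Int.band (z1 - z0) pvMASK64 = ((2^a * m1 : Nat) : Int) := by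
      rw [← hn1]; omega
    have e2 : PySem.Int.band (z2 - z1) pvMASK64 = ((2^b * m2 : Nat) : Int) := by
      rw [← hn2]; omega
    have hm1pos : 1 ≤ m1 := hm1odd.pos
    have hm2pos : 1 ≤ m2 := hm2odd.pos
    -- size bounds on the exponents
    have hd1lt : 2^a * m1 < 2^64 := by
      rw [e1] at h1lt; exact_mod_cast h1lt
    have hd2lt : 2^b * m2 < 2^64 := by
      rw [e2] at h2lt; exact_mod_cast h2lt
    have ha64 : a < 64 := by
      have h1 : 2^a ≤ 2^a * m1 := Nat.le_mul_of_pos_right _ hm1pos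
      have h2 : 2^a < 2^64 := lt_of_le_of_lt h1 hd1lt
      exact (Nat.pow_lt_pow_iff_right (by norm_num)).mp h2
    -- the precondition yields a ≤ b
    rw [e1, e2] at hpre
    simp only at hpre
    have hdvd : PySem.Int.band ((2^a * m1 : Nat) : Int) (-((2^a * m1 : Nat) : Int)) ∣ ((2^b * m2 : Nat) : Int) := by
      rcases hpre with h | h | h
      · exact absurd h (by rw [← e1] at h; exact absurd h h1ne)
      · exact absurd h (by rw [← e2] at h; exact absurd h h2ne)
      · exact h
    rw [pv_band_neg_self a m1 hm1odd] at hdvd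
    have hdvdN : 2^a ∣ 2^b * m2 := Int.natCast_dvd_natCast.mp hdvd
    have hab : a ≤ b := by
      by_contra hba
      rw [Nat.not_le] at hba
      have hd : 2^(b+1) ∣ 2^b * m2 := dvd_trans (pow_dvd_pow 2 (by omega)) hdvdN
      rw [pow_succ] at hd
      have h2m : 2 ∣ m2 := (Nat.mul_dvd_mul_iff_left (Nat.two_pow_pos b)).mp hd
      obtain ⟨c, hc⟩ := h2m
      have := Nat.odd_iff.mp hm2odd
      omega
    -- shared abbreviations
    have hm1o : ((m1 : Nat) : Int) % 2 = 1 := by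
      have := Nat.odd_iff.mp hm1odd; omega
    have hkn1 : 1 ≤ 64 - a := by omega
    have hd2Inn0 : (0:Int) ≤ ((2^b * m2 : Nat) : Int) := by positivity
    have hd2Ilt0 : ((2^b * m2 : Nat) : Int) < 2^64 := by exact_mod_cast hd2lt
    set d2I : Int := ((2^b * m2 : Nat) : Int) with hd2I
    have hd2Inn : 0 ≤ d2I := hd2Inn0
    have hd2Ilt : d2I < 2^64 := hd2Ilt0
    -- the common reduced second difference d2 / 2^a, with its bounds
    set d2p : Int := d2I / 2^a with hd2p
    have hd2pnn : 0 ≤ d2p := Int.ediv_nonneg hd2Inn (by positivity)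
    have hd2plt : d2p < 2^(64-a) := by
      rw [hd2p, Int.ediv_lt_iff_lt_mul (by positivity)]
      calc d2I < 2^64 := hd2Ilt
        _ = 2^(64-a) * 2^a := by rw [← pow_add]; congr 1; omega
    -- ===== the A side =====
    rw [e1, e2, pv_tz_eq a m1 hm1odd, pv_tz_eq b m2 hm2odd]
    have hmin : min ((a : Nat) : Int) ((b : Nat) : Int) = ((a : Nat) : Int) :=
      min_eq_left (by exact_mod_cast hab)
    rw [hmin]
    have htna : (((a : Nat) : Int)).toNat = a := Int.toNat_natCast a
    have hkn : (((64 : Int) - ((a : Nat) : Int))).toNat = 64 - a := by omega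
    have hkcast : ((64 : Int) - ((a : Nat) : Int)) = (((64 - a : Nat) : Nat) : Int) := by omega
    have hshr1 : ((2^a * m1 : Nat) : Int) >>> a = ((m1 : Nat) : Int) := by
      rw [pv_shr]
      push_cast
      exact Int.mul_ediv_cancel_left _ (by positivity)
    have hshr2 : d2I >>> a = d2p := by rw [pv_shr, hd2p]
    obtain ⟨hH0, hH1, hH2⟩ := pv_hensel ((m1 : Nat) : Int) hm1o (64 - a) hkn1
    have hinvA : pvInvOddMod2k ((m1 : Nat) : Int) ((64 : Int) - ((a : Nat) : Int)) = pvHfold ((m1 : Nat) : Int) (((64 - a : Nat) : Nat) : Int) := by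
      unfold pvInvOddMod2k
      rw [hkcast]
      rw [Int.toNat_natCast, pv_shl_one, PySem.Int.mod_eq_emod_of_pos (by positivity)]
      exact Int.emod_eq_of_lt hH0 hH1
    set invV : Int := pvHfold ((m1 : Nat) : Int) (((64 - a : Nat) : Nat) : Int) with hinvV
    set Amod : Int := PySem.Int.mod (d2p * invV) ((2:Int)^(64-a)) with hAmod
    have hAmodEmod : Amod = (d2p * invV) % 2^(64-a) :=
      PySem.Int.mod_eq_emod_of_pos (by positivity)
    have hAmod0 : 0 ≤ Amod := PySem.Int.mod_nonneg _ (by positivity)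
    have hAmod1 : Amod < 2^(64-a) := PySem.Int.mod_lt _ (by positivity)
    -- A_mod solves m1 * x ≡ d2p (mod 2^(64-a))
    have hAsol : (2:Int)^(64-a) ∣ d2p - ((m1 : Nat) : Int) * Amod := by
      have he : d2p - ((m1 : Nat) : Int) * Amod
          = d2p * (1 - ((m1 : Nat) : Int) * invV)
            + ((m1 : Nat) : Int) * (d2p * invV - Amod) := by ring
      rw [he]
      refine dvd_add ?_ ?_
      · have : (1 : Int) - ((m1 : Nat) : Int) * invV = -(((m1 : Nat) : Int) * invV - 1) := by ring
        rw [this]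
        exact Dvd.dvd.mul_left ((dvd_neg).mpr hH2) d2p
      · rw [hAmodEmod, Int.emod_def]
        have : d2p * invV - (d2p * invV - 2^(64-a) * (d2p * invV / 2^(64-a)))
            = 2^(64-a) * (d2p * invV / 2^(64-a)) := by ring
        rw [this]
        exact Dvd.dvd.mul_left (dvd_mul_right _ _) _
    -- ===== the B side =====
    have hhalve : pvHalve ((2^a * m1 : Nat) : Int) d2I 64 = (((m1 : Nat) : Int), d2p, 64 - (a : Int)) :=
      pv_halve_eq a m1 hm1odd d2I 64 hd2Inn
    rw [hhalve]
    set Bst := (PySem.List.pyRange 0 ((64 : Int) - ((a : Nat) : Int))).foldl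
        (pvDivStep ((m1 : Nat) : Int) (((1 : Int) <<< ((64 : Int) - ((a : Nat) : Int)).toNat) - 1)) (0, d2p) with hBst
    have hmaskeq : ((1 : Int) <<< ((64 : Int) - ((a : Nat) : Int)).toNat) - 1 = (2:Int)^(64-a) - 1 := by
      rw [hkn, pv_shl_one]
    obtain ⟨hB0, hB1, hBsol⟩ := pv_div_sol ((m1 : Nat) : Int) d2p (64 - a) hm1o hd2pnn hd2plt
    have hBstEq : Bst = (PySem.List.pyRange 0 (((64 - a : Nat) : Nat) : Int)).foldl
        (pvDivStep ((m1 : Nat) : Int) ((2:Int)^(64-a) - 1)) (0, d2p) := by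
      rw [hBst, hmaskeq, hkcast]
    -- the two solutions agree (uniqueness modulo 2^(64-a))
    have hdiffdvd : (2:Int)^(64-a) ∣ ((m1 : Nat) : Int) * Amod - ((m1 : Nat) : Int) * Bst.1 := by
      have he : ((m1 : Nat) : Int) * Amod - ((m1 : Nat) : Int) * Bst.1
          = (d2p - ((m1 : Nat) : Int) * Bst.1) - (d2p - ((m1 : Nat) : Int) * Amod) := by ring
      rw [he, hBstEq]
      exact dvd_sub hBsol hAsol
    have hABdvd : (2:Int)^(64-a) ∣ Amod - Bst.1 :=
      pv_cancel ((m1 : Nat) : Int) invV ((2:Int)^(64-a)) Amod Bst.1 hH2 hdiffdvd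
    have hAB : Amod = Bst.1 := by
      have hB0' : 0 ≤ Bst.1 := by rw [hBstEq]; exact hB0
      have hB1' : Bst.1 < 2^(64-a) := by rw [hBstEq]; exact hB1
      have := Int.eq_zero_of_abs_lt_dvd hABdvd (by rw [abs_lt]; constructor <;> omega)
      omega
    -- ===== assemble the two candidate lists =====
    have hk2 : ((64 : Int) - ((a : Nat) : Int) - ((64 : Int) - ((a : Nat) : Int))) = 0 := by ring
    have hvr : ((64 : Int) - ((64 : Int) - ((a : Nat) : Int))).toNat = a := by omega
    simp only [htna, hkn, hshr1, hshr2, hinvA, pv_shl_one, hvr]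
    rw [show PySem.Int.mod (d2p * invV) ((2:Int)^(64-a)) = Amod from rfl]
    apply congrArg
    apply List.map_congr_left
    intro t ht
    rw [PySem.List.mem_pyRange_one] at ht
    have ht0 : 0 ≤ t := ht.1
    have ht1 : t < ((2^a : Nat) : Int) := by
      have : ((2:Int)^a) = (((2^a : Nat) : Int)) := by push_cast; ring
      rw [← this]; exact ht.2
    simp only [pv_shl]
    rw [← hAB]
    exact pv_last Amod t a (by omega) hAmod0 hAmod1 ht0 ht1

-- ===== VERDICT (by name: the statement is the Claim_ definition above) =====
theorem recover_stepn_A_candidates_spec : Claim_equal_recover_stepn_A_candidates := by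
  intro z0 z1 z2 _ hpre
  unfold Spec_recover_stepn_A_candidates
  exact pv_main z0 z1 z2 hpre
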